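-- pv_equiv track=rewrite | github.com/davidiach/erdos97 | scripts/check_n9_row_ptolemy_product_cancellations.py | _row_witness_order
-- ===== SOURCE A (Python) =====
-- from typing import Any, Sequence
--
-- def _row_witness_order(
--     order: Sequence[int],
--     center: int,
--     witnesses: Sequence[int],
-- ) -> list[int]:
--     positions = {label: index for index, label in enumerate(order)}
--     if center not in positions:
--         raise ValueError(f"center {center} is missing from cyclic order")
--     missing = [witness for witness in witnesses if witness not in positions]
--     if missing:
--         raise ValueError(f"witness {missing[0]} is missing from cyclic order")
--     center_pos = positions[center]
--     return sorted(witnesses, key=lambda witness: (positions[witness] - center_pos) % len(order))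
-- ===== SOURCE B (Python) =====
-- def _row_witness_order(order, center, witnesses):
--     positions = {label: index for index, label in enumerate(order)}
--     if center not in positions:
--         raise ValueError(f"center {center} is missing from cyclic order")
--     missing = [witness for witness in witnesses if witness not in positions]
--     if missing:
--         raise ValueError(f"witness {missing[0]} is missing from cyclic order")
--     counts = {}
--     for witness in witnesses:
--         counts[witness] = counts.get(witness, 0) + 1
--     center_pos = positions[center]
--     n = len(order)
--     result = []
--     for offset in range(n):
--         pos = (center_pos + offset) % n
--         label = order[pos]
--         if positions[label] == pos and label in counts:
--             result.extend([label] * counts[label])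
--     return result
-- ===== Notes on version B (the rewrite author's own statement) =====
-- stated objective: alternative
-- what changed: B replaces A's keyed sort of the witnesses by building a multiplicity dict once and walking the cyclic order a single time from the center, emitting each canonical label count-many times.
import Mathlib
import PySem

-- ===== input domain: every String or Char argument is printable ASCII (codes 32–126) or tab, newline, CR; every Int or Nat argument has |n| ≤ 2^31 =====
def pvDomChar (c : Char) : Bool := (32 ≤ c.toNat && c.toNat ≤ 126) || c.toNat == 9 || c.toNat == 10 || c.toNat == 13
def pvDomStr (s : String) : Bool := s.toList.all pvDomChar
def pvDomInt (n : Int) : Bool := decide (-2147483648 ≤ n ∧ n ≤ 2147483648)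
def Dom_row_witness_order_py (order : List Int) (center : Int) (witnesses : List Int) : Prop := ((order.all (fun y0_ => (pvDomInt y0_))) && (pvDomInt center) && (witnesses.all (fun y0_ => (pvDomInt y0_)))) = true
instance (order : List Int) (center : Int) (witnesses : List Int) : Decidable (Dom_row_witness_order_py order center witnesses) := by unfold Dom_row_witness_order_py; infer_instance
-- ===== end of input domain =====

-- B replaces A's keyed sort by a single walk of the cyclic order with a multiplicity map (alternative algorithm, same cost class).
-- ===== PORT A =====
-- positions = {label: index for index, label in enumerate(order)}   (shared by both Pythons verbatim)
def pvBuildPos (order : List Int) : PySem.Dict Int Int :=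
  (PySem.List.enumerate order 0).foldl (fun d p => d.insert p.2 p.1) PySem.Dict.empty

def row_witness_order_py (order : List Int) (center : Int) (witnesses : List Int) : List Int :=
  let positions := pvBuildPos order
  if positions.contains center = false then
    []  -- Python raises ValueError here; excluded by Pre_
  else
    let missing := witnesses.filter (fun w => positions.contains w = false)
    if missing ≠ [] then
      []  -- Python raises ValueError here; excluded by Pre_
    else
      let center_pos := positions.getD center 0
      PySem.List.sorted witnesses
        (fun w => PySem.Int.mod (positions.getD w 0 - center_pos) (order.length : Int)) false

-- ===== PORT B =====
def row_witness_order_py_alt (order : List Int) (center : Int) (witnesses : List Int) : List Int :=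
  let positions := pvBuildPos order
  if positions.contains center = false then
    []  -- Python raises ValueError here; excluded by Pre_
  else
    let missing := witnesses.filter (fun w => positions.contains w = false)
    if missing ≠ [] then
      []  -- Python raises ValueError here; excluded by Pre_
    else
      let counts : PySem.Dict Int Int := witnesses.foldl (fun d w => d.insert w (d.getD w 0 + 1)) PySem.Dict.empty
      let center_pos := positions.getD center 0
      let n : Int := (order.length : Int)
      (PySem.List.pyRange 0 n 1).foldl
        (fun result offset =>
          let pos := PySem.Int.mod (center_pos + offset) n
          let label := PySem.List.pyGetD order pos 0
          if positions.getD label 0 = pos ∧ counts.contains label = true then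
            result ++ List.replicate (counts.getD label 0).toNat label
          else result)
        []

-- ===== PRECONDITION & SPEC =====
-- Pre_ excludes exactly the inputs where A raises ValueError (center or some witness missing from order).
def Pre_row_witness_order_py (order : List Int) (center : Int) (witnesses : List Int) : Prop :=
  center ∈ order ∧ ∀ w ∈ witnesses, w ∈ order
instance (order : List Int) (center : Int) (witnesses : List Int) : Decidable (Pre_row_witness_order_py order center witnesses) := by unfold Pre_row_witness_order_py; infer_instance

def pvWitness_row_witness_order_py : List Int × Int × List Int := ([1, 2, 3, 2], 2, [3, 1, 3])

def Spec_row_witness_order_py (order : List Int) (center : Int) (witnesses : List Int) (out : List Int) : Prop := out = row_witness_order_py_alt order center witnesses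
instance (order : List Int) (center : Int) (witnesses : List Int) (out : List Int) : Decidable (Spec_row_witness_order_py order center witnesses out) := by unfold Spec_row_witness_order_py; infer_instance

-- ===== CLAIM (what is proved, stated in full; the proofs are below) =====
def Claim_equal_row_witness_order_py : Prop := ∀ (order : List Int) (center : Int) (witnesses : List Int), Dom_row_witness_order_py order center witnesses → Pre_row_witness_order_py order center witnesses → Spec_row_witness_order_py order center witnesses (row_witness_order_py order center witnesses)

-- ===== LEMMAS AND PROOFS =====

lemma pvBuildPos_append (xs : List Int) (x : Int) :
    pvBuildPos (xs ++ [x]) = (pvBuildPos xs).insert x (xs.length : Int) := by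
  simp [pvBuildPos, PySem.List.enumerate_append, PySem.List.enumerate_cons,
    PySem.List.enumerate_nil, List.foldl_append]

lemma pvBuildPos_get?_spec (order : List Int) (l i : Int)
    (h : (pvBuildPos order).get? l = some i) :
    0 ≤ i ∧ i < (order.length : Int) ∧ order.getD i.toNat 0 = l := by
  induction order using List.reverseRecOn generalizing l i with
  | nil => simp [pvBuildPos, PySem.List.enumerate_nil, PySem.Dict.get?_empty] at h
  | append_singleton xs x ih =>
    rw [pvBuildPos_append] at h
    rw [PySem.Dict.get?_insert] at h
    by_cases hx : l = x
    · simp [hx] at h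
      subst hx
      refine ⟨by omega, by simp; omega, ?_⟩
      simp [← h]
    · simp [hx] at h
      obtain ⟨h1, h2, h3⟩ := ih l i h
      refine ⟨h1, by simp; omega, ?_⟩
      rw [List.getD_append (h := by omega)]
      exact h3

lemma pvBuildPos_contains_iff (order : List Int) (l : Int) :
    (pvBuildPos order).contains l = true ↔ l ∈ order := by
  constructor
  · intro h
    rw [PySem.Dict.contains_eq_isSome_get?] at h
    obtain ⟨i, hi⟩ := Option.isSome_iff_exists.mp h
    obtain ⟨h1, h2, h3⟩ := pvBuildPos_get?_spec order l i hi
    have hlt : i.toNat < order.length := by omega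
    rw [List.getD_eq_getElem order 0 hlt] at h3
    exact h3 ▸ List.getElem_mem hlt
  · intro h
    induction order using List.reverseRecOn with
    | nil => simp at h
    | append_singleton xs x ih =>
      rw [pvBuildPos_append, PySem.Dict.contains_insert]
      rcases List.mem_append.mp h with h' | h'
      · simp [ih h']
      · simp at h'; simp [h']

lemma pv_emod_sub_left (a c n : Int) : (a % n - c) % n = (a - c) % n := by
  conv_rhs => rw [Int.sub_emod]
  rw [Int.sub_emod (a % n), Int.emod_emod_of_dvd _ dvd_rfl]

lemma pv_emod_add_right (c x n : Int) : (c + x % n) % n = (c + x) % n := by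
  conv_rhs => rw [Int.add_emod]
  rw [Int.add_emod c (x % n), Int.emod_emod_of_dvd _ dvd_rfl]

lemma pv_mod_inj (n c p1 p2 : Int) (h1 : 0 ≤ p1) (h2 : p1 < n) (h3 : 0 ≤ p2) (h4 : p2 < n)
    (he : (p1 - c) % n = (p2 - c) % n) : p1 = p2 := by
  have h0 : (p1 - c - (p2 - c)) % n = 0 := Int.emod_eq_emod_iff_emod_sub_eq_zero.mp he
  have h0' : (p1 - p2) % n = 0 := by rw [show p1 - c - (p2 - c) = p1 - p2 by ring] at h0; exact h0
  have hd : n ∣ (p1 - p2) := Int.dvd_of_emod_eq_zero h0'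
  have := Int.eq_zero_of_abs_lt_dvd hd (by rw [abs_lt]; omega)
  omega

lemma pv_foldl_if_append {α β : Type} (p : β → Prop) [DecidablePred p] (f : β → List α) (l : List β) (acc : List α) :
    List.foldl (fun acc x => if p x then acc ++ f x else acc) acc l
      = acc ++ l.flatMap (fun x => if p x then f x else []) := by
  induction l generalizing acc with
  | nil => simp
  | cons x t ih => simp only [List.foldl_cons, List.flatMap_cons]; rw [ih]; split <;> simp

lemma pv_foldl_if_append_nil {α β : Type} (p : β → Prop) [DecidablePred p] (f : β → List α) (l : List β) :
    List.foldl (fun acc x => if p x then acc ++ f x else acc) [] l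
      = l.flatMap (fun x => if p x then f x else []) := by
  simpa using pv_foldl_if_append p f l []

lemma pv_core (order witnesses : List Int) (P : PySem.Dict Int Int) (c n : Int)
    (hn : 0 < n) (hlen : n = (order.length : Int))
    (h1 : ∀ w ∈ order, 0 ≤ P.getD w 0 ∧ P.getD w 0 < n ∧ order.getD (P.getD w 0).toNat 0 = w)
    (hw : ∀ w ∈ witnesses, w ∈ order) :
    PySem.List.sorted witnesses (fun w => (P.getD w 0 - c) % n) false =
    List.flatMap
      (fun x =>
        if P.getD (PySem.List.pyGetD order ((c + x) % n) 0) 0 = (c + x) % n ∧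
            (PySem.Dict.counter witnesses).contains (PySem.List.pyGetD order ((c + x) % n) 0) = true then
          List.replicate
            ((PySem.Dict.counter witnesses).getD (PySem.List.pyGetD order ((c + x) % n) 0) 0).toNat
            (PySem.List.pyGetD order ((c + x) % n) 0)
        else [])
      (PySem.List.pyRange 0 n 1) := by
  subst hlen
  set blk : Int → List Int := fun x =>
    if P.getD (PySem.List.pyGetD order ((c + x) % (order.length : Int)) 0) 0 = (c + x) % (order.length : Int) ∧
        (PySem.Dict.counter witnesses).contains (PySem.List.pyGetD order ((c + x) % (order.length : Int)) 0) = true then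
      List.replicate
        ((PySem.Dict.counter witnesses).getD (PySem.List.pyGetD order ((c + x) % (order.length : Int)) 0) 0).toNat
        (PySem.List.pyGetD order ((c + x) % (order.length : Int)) 0)
    else [] with hblk
  have hinj : ∀ a ∈ order, ∀ b ∈ order, P.getD a 0 = P.getD b 0 → a = b := by
    intro a ha b hb he
    obtain ⟨-, -, e1⟩ := h1 a ha
    obtain ⟨-, -, e2⟩ := h1 b hb
    rw [← e1, ← e2, he]
  have hmem : ∀ o x, x ∈ blk o → P.getD x 0 = (c + o) % (order.length : Int) ∧ x ∈ witnesses := by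
    intro o x hx
    rw [hblk] at hx
    simp only at hx
    split at hx
    next hcond =>
      have hxe := List.eq_of_mem_replicate hx
      subst hxe
      refine ⟨hcond.1, ?_⟩
      have h2 := hcond.2
      rw [PySem.Dict.contains_counter] at h2
      simpa using h2
    next => simp at hx
  have harith : ∀ o : Int, 0 ≤ o → o < (order.length : Int) → ((c + o) % (order.length : Int) - c) % (order.length : Int) = o := by
    intro o ho1 ho2
    rw [pv_emod_sub_left, show c + o - c = o from by ring, Int.emod_eq_of_lt ho1 ho2]
  have hkey : ∀ o : Int, 0 ≤ o → o < (order.length : Int) → ∀ x, x ∈ blk o →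
      (P.getD x 0 - c) % (order.length : Int) = o := by
    intro o ho1 ho2 x hx
    rw [(hmem o x hx).1]
    exact harith o ho1 ho2
  have hcount : ∀ w, (List.flatMap blk (PySem.List.pyRange 0 (order.length : Int) 1)).count w = witnesses.count w := by
    intro w
    by_cases hwm : w ∈ witnesses
    · obtain ⟨hp0, hpn, hgd⟩ := h1 w (hw w hwm)
      have hple : (P.getD w 0).toNat < order.length := by omega
      set p := P.getD w 0 with hp
      set ow := (p - c) % (order.length : Int) with how
      have ho1 : 0 ≤ ow := Int.emod_nonneg _ (by omega)
      have ho2 : ow < (order.length : Int) := Int.emod_lt_of_pos _ hn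
      have hpos : (c + ow) % (order.length : Int) = p := by
        rw [how, pv_emod_add_right, show c + (p - c) = p from by ring, Int.emod_eq_of_lt hp0 hpn]
      have hlabel : PySem.List.pyGetD order p 0 = w := by
        rw [PySem.List.pyGetD_eq_getElem order 0 hp0 hpn]
        rw [List.getD_eq_getElem order 0 hple] at hgd
        exact hgd
      have hz : ∀ o : Int, 0 ≤ o → o < (order.length : Int) → o ≠ ow → w ∉ blk o := by
        intro o ha hb hne hmemw
        refine hne ?_
        have : ow = o := by
          rw [how, hp, (hmem o w hmemw).1]
          exact harith o ha hb
        exact this.symm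
      rw [PySem.List.pyRange_one_append 0 ow (order.length : Int) ho1 (le_of_lt ho2),
        PySem.List.pyRange_one_cons ho2, List.flatMap_append, List.flatMap_cons,
        List.count_append, List.count_append]
      have hz1 : (List.flatMap blk (PySem.List.pyRange 0 ow 1)).count w = 0 := by
        rw [List.count_eq_zero]
        intro hmm
        rw [List.mem_flatMap] at hmm
        obtain ⟨o, hoR, hwo⟩ := hmm
        rw [PySem.List.mem_pyRange_one] at hoR
        exact hz o hoR.1 (by omega) (by omega) hwo
      have hz2 : (List.flatMap blk (PySem.List.pyRange (ow + 1) (order.length : Int) 1)).count w = 0 := by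
        rw [List.count_eq_zero]
        intro hmm
        rw [List.mem_flatMap] at hmm
        obtain ⟨o, hoR, hwo⟩ := hmm
        rw [PySem.List.mem_pyRange_one] at hoR
        exact hz o (by omega) hoR.2 (by omega) hwo
      have hcen : (blk ow).count w = witnesses.count w := by
        rw [hblk]
        simp only
        rw [hpos, hlabel]
        rw [if_pos ⟨rfl, by rw [PySem.Dict.contains_counter]; simpa using hwm⟩]
        rw [PySem.Dict.getD_counter]
        simp [List.count_replicate_self]
      rw [hz1, hz2, hcen]
      omega
    · rw [List.count_eq_zero.mpr hwm, List.count_eq_zero]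
      intro hmm
      rw [List.mem_flatMap] at hmm
      obtain ⟨o, -, hwo⟩ := hmm
      exact hwm (hmem o w hwo).2
  have hpairB : (List.flatMap blk (PySem.List.pyRange 0 (order.length : Int) 1)).Pairwise
      (fun a b => (P.getD a 0 - c) % (order.length : Int) < (P.getD b 0 - c) % (order.length : Int) ∨ a = b) := by
    rw [List.flatMap_def, List.pairwise_flatten]
    constructor
    · intro l' hl'
      rw [List.mem_map] at hl'
      obtain ⟨o, -, rfl⟩ := hl'
      apply List.pairwise_of_forall_mem_list
      intro a ha b hb
      right
      have hxa := hmem o a ha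
      have hyb := hmem o b hb
      exact hinj a (hw a hxa.2) b (hw b hyb.2) (hxa.1.trans hyb.1.symm)
    · rw [List.pairwise_map]
      refine (PySem.List.pairwise_lt_pyRange_one 0 (order.length : Int)).imp_of_mem ?_
      intro o1 o2 ho1 ho2 hlt x hx y hy
      rw [PySem.List.mem_pyRange_one] at ho1 ho2
      left
      rw [hkey o1 ho1.1 ho1.2 x hx, hkey o2 ho2.1 ho2.2 y hy]
      exact hlt
  have hpairS : (PySem.List.sorted witnesses (fun w => (P.getD w 0 - c) % (order.length : Int)) false).Pairwise
      (fun a b => (P.getD a 0 - c) % (order.length : Int) < (P.getD b 0 - c) % (order.length : Int) ∨ a = b) := by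
    have hp := PySem.List.sorted_pairwise (xs := witnesses)
      (key := fun w => (P.getD w 0 - c) % (order.length : Int))
    refine hp.imp_of_mem ?_
    intro a b ha hb hle
    rw [PySem.List.mem_sorted] at ha hb
    by_cases heq : a = b
    · exact Or.inr heq
    · left
      refine lt_of_le_of_ne hle (fun hkeq => heq ?_)
      obtain ⟨a1, a2, -⟩ := h1 a (hw a ha)
      obtain ⟨b1, b2, -⟩ := h1 b (hw b hb)
      exact hinj a (hw a ha) b (hw b hb) (pv_mod_inj (order.length : Int) c _ _ a1 a2 b1 b2 hkeq)
  have hperm : (PySem.List.sorted witnesses (fun w => (P.getD w 0 - c) % (order.length : Int)) false).Perm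
      (List.flatMap blk (PySem.List.pyRange 0 (order.length : Int) 1)) :=
    (PySem.List.sorted_perm witnesses (fun w => (P.getD w 0 - c) % (order.length : Int)) false).trans (List.perm_iff_count.mpr hcount).symm
  exact hperm.eq_of_pairwise
    (fun a b _ _ hab hba => by
      rcases hab with h | h
      · rcases hba with h' | h'
        · exact absurd h' (lt_asymm h)
        · exact h'.symm
      · exact h)
    hpairS hpairB

lemma pv_main (order : List Int) (center : Int) (witnesses : List Int)
    (hc : center ∈ order) (hw : ∀ w ∈ witnesses, w ∈ order) :
    row_witness_order_py order center witnesses = row_witness_order_py_alt order center witnesses := by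
  have hcont : ∀ w ∈ order, (pvBuildPos order).contains w = true :=
    fun w h => (pvBuildPos_contains_iff order w).mpr h
  have hfil : witnesses.filter (fun w => decide ((pvBuildPos order).contains w = false)) = [] :=
    List.filter_eq_nil_iff.mpr (fun w hmem => by simp [hcont w (hw w hmem)])
  have hn : 0 < (order.length : Int) := by
    cases order with
    | nil => simp at hc
    | cons a t => simp
  have h1 : ∀ w ∈ order, 0 ≤ (pvBuildPos order).getD w 0 ∧
      (pvBuildPos order).getD w 0 < (order.length : Int) ∧
      order.getD ((pvBuildPos order).getD w 0).toNat 0 = w := by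
    intro w hmemw
    have hco := hcont w hmemw
    rw [PySem.Dict.contains_eq_isSome_get?] at hco
    obtain ⟨i, hi⟩ := Option.isSome_iff_exists.mp hco
    have hg : (pvBuildPos order).getD w 0 = i := by
      rw [PySem.Dict.getD_eq_get?_getD, hi]
      rfl
    rw [hg]
    exact pvBuildPos_get?_spec order w i hi
  simp only [row_witness_order_py, row_witness_order_py_alt, hcont center hc, hfil,
    PySem.Dict.foldl_insert_getD_add_one_eq_counter]
  simp only [Bool.true_eq_false, if_false, ne_eq, not_true_eq_false]
  rw [pv_foldl_if_append_nil]
  simp only [PySem.Int.mod_eq_emod_of_pos hn]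
  exact pv_core order witnesses (pvBuildPos order) ((pvBuildPos order).getD center 0)
    (order.length : Int) hn rfl h1 hw

-- ===== VERDICT (by name: the statement is the Claim_ definition above) =====
theorem row_witness_order_py_spec : Claim_equal_row_witness_order_py := by
  intro order center witnesses _ hpre
  unfold Spec_row_witness_order_py
  exact pv_main order center witnesses hpre.1 hpre.2
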